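-- pv_equiv track=rewrite | github.com/dhivya24/Maximl | substring.py | max_char
-- ===== SOURCE A (Python) =====
-- chars = 256
--
-- def max_char(str, n):
--   count = [0] * chars
--   for i in range(n):
--       count[ord(str[i])] += 1
--   dis_val = 0
--   for i in range(chars):
--       if (count[i] != 0):
--           dis_val += 1
--   return dis_val
-- ===== SOURCE B (Python) =====
-- def max_char(str, n):
--   dis_val = 0
--   for i in range(n):
--       if str[i] not in str[:i]:
--           dis_val += 1
--   return dis_val
-- ===== Notes on version B (the rewrite author's own statement) =====
-- stated objective: alternative
-- what changed: Instead of building a 256-slot frequency table and then scanning the whole alphabet, B keeps no auxiliary structure at all: it counts the characters that are first occurrences by testing each str[i] for membership in the already-read prefix str[:i].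
import Mathlib
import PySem

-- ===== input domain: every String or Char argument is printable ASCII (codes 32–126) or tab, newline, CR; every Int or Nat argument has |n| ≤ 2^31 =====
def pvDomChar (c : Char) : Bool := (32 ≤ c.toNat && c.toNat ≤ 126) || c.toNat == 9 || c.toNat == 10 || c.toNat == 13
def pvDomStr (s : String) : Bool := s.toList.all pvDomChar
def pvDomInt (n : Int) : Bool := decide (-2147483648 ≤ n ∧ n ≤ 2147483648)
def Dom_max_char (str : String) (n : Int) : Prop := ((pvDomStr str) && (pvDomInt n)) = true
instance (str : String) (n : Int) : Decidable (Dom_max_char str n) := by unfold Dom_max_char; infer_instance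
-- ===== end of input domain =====

-- B drops A's 256-slot frequency table and alphabet scan: it counts first occurrences by
-- testing each str[i] for membership in the already-read prefix str[:i] (objective: alternative).

-- ===== PORT A =====
-- for i in range(n): count[ord(str[i])] += 1   (str[i] out of range = IndexError, excluded by Pre_; the none-branch only totalizes)
def max_char (str : String) (n : Int) : Int :=
  let cs := str.toList
  let count := (PySem.List.pyRange 0 n 1).foldl
    (fun c i =>
      match PySem.List.pyGet? cs i with
      | some ch => c.modify ch.toNat (· + 1)
      | none => c)
    (List.replicate 256 (0 : Int))
  (PySem.List.pyRange 0 256 1).foldl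
    (fun d i => if PySem.List.pyGetD count i 0 ≠ 0 then d + 1 else d) 0

-- ===== PORT B =====
-- for i in range(n): if str[i] not in str[:i]: dis_val += 1
-- ('c in s' for the single character c = str[i] is exactly char membership in the slice's characters)
def max_char_alt (str : String) (n : Int) : Int :=
  let cs := str.toList
  (PySem.List.pyRange 0 n 1).foldl
    (fun d i =>
      match PySem.List.pyGet? cs i with
      | some ch => if (PySem.List.slice cs none (some i)).contains ch then d else d + 1
      | none => d)
    0

-- ===== PRECONDITION & SPEC =====
-- Pre_ excludes exactly the inputs where str[i] raises IndexError (n exceeds the length); both A and B raise there.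
def Pre_max_char (str : String) (n : Int) : Prop := n ≤ PySem.Str.len str
instance (str : String) (n : Int) : Decidable (Pre_max_char str n) := by unfold Pre_max_char; infer_instance
def pvWitness_max_char : String × Int := ("hello", 4)

def Spec_max_char (str : String) (n : Int) (out : Int) : Prop := out = max_char_alt str n
instance (str : String) (n : Int) (out : Int) : Decidable (Spec_max_char str n out) := by unfold Spec_max_char; infer_instance

-- ===== CLAIM (what is proved, stated in full; the proofs are below) =====
def Claim_equal_max_char : Prop := ∀ (str : String) (n : Int), Dom_max_char str n → Pre_max_char str n → Spec_max_char str n (max_char str n)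

-- ===== LEMMAS AND PROOFS =====

-- a fold over range(n) reading str[i] is a fold over the prefix of length n
theorem fold_range_get {α : Type} (cs : List Char) (g : α → Char → α) :
    ∀ (m : Nat) (init : α), m ≤ cs.length →
    (List.range m).foldl
      (fun acc k =>
        match PySem.List.pyGet? cs ((k : Nat) : Int) with
        | some ch => g acc ch
        | none => acc) init
    = (cs.take m).foldl g init := by
  intro m
  induction m with
  | zero => intro init _; simp
  | succ m ih =>
    intro init hm
    have hm' : m < cs.length := by omega
    rw [List.range_succ, List.foldl_append, ih init (by omega)]
    rw [List.take_add_one, List.foldl_append]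
    simp [PySem.List.pyGet?_natCast, hm']

theorem modify_map_range (f : Nat → Int) (k : Nat) (hk : k < 256) :
    ((List.range 256).map f).modify k (· + 1)
      = (List.range 256).map (fun j => if j = k then f j + 1 else f j) := by
  apply List.ext_getElem
  · simp
  · intro j h1 _
    simp only [List.getElem_modify]
    simp only [List.length_modify, List.length_map, List.length_range] at h1
    simp [List.getElem_map, List.getElem_range]
    rcases eq_or_ne k j with h | h
    · simp [h]
    · simp [h, Ne.symm h]

-- A's counting loop over l produces the per-code occurrence counts
theorem count_fold (l : List Char) :
    ∀ (f : Nat → Int), (∀ ch ∈ l, ch.toNat < 256) →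
    l.foldl (fun c ch => c.modify ch.toNat (· + 1)) ((List.range 256).map f)
      = (List.range 256).map (fun j => f j + (l.countP (fun ch => ch.toNat == j) : Int)) := by
  induction l with
  | nil => intro f _; simp
  | cons ch t ih =>
    intro f hcodes
    have hch : ch.toNat < 256 := hcodes ch (by simp)
    rw [List.foldl_cons, modify_map_range f ch.toNat hch,
        ih _ (fun c hc => hcodes c (by simp [hc]))]
    apply List.map_congr_left
    intro j hj
    rw [List.countP_cons]
    rcases eq_or_ne j ch.toNat with h | h
    · simp [h]; ring
    · simp [h, Ne.symm h]

-- the number of codes below 256 hit by l equals the number of distinct characters of l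
theorem countP_range_eq_set_len (l : List Char) (hcodes : ∀ ch ∈ l, ch.toNat < 256) :
    ((List.range 256).countP (fun j => decide (l.countP (fun ch => ch.toNat == j) ≠ 0)) : Int)
      = PySem.Set.len (PySem.Set.ofList l) := by
  have hpred : ∀ j ∈ List.range 256,
      (decide (l.countP (fun ch => ch.toNat == j) ≠ 0)) = true
        ↔ (decide (j ∈ (PySem.Set.ofList l).map Char.toNat)) = true := by
    intro j _
    simp only [decide_eq_true_eq, List.mem_map, PySem.Set.mem_ofList]
    constructor
    · intro h
      rcases List.countP_pos_iff.mp (Nat.pos_of_ne_zero h) with ⟨ch, hch, hc⟩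
      exact ⟨ch, hch, beq_iff_eq.mp hc⟩
    · rintro ⟨ch, hch, hc⟩
      have hpos : 0 < l.countP (fun ch => ch.toNat == j) :=
        List.countP_pos_iff.mpr ⟨ch, hch, by simp [hc]⟩
      omega
  rw [List.countP_congr hpred]
  have hinj : Function.Injective Char.toNat := by
    intro a b h
    exact Char.ext (UInt32.toNat_inj.mp h)
  have hnd : ((PySem.Set.ofList l).map Char.toNat).Nodup :=
    (PySem.Set.nodup_ofList l).map hinj
  have hperm : ((List.range 256).filter (fun j => decide (j ∈ (PySem.Set.ofList l).map Char.toNat))).Perm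
      ((PySem.Set.ofList l).map Char.toNat) := by
    rw [List.perm_ext_iff_of_nodup (List.Nodup.filter _ (List.nodup_range)) hnd]
    intro j
    simp only [List.mem_filter, List.mem_range, decide_eq_true_eq]
    constructor
    · exact fun h => h.2
    · intro hj
      refine ⟨?_, hj⟩
      rcases List.mem_map.mp hj with ⟨ch, hch, rfl⟩
      exact hcodes ch ((PySem.Set.mem_ofList l ch).mp hch)
  rw [List.countP_eq_length_filter, hperm.length_eq]
  simp [PySem.Set.len, List.length_map]

-- B's loop: after m steps the accumulator counts the first occurrences among the first m
-- characters, i.e. the number of distinct characters of cs.take m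
theorem b_fold_eq_set_len (cs : List Char) :
    ∀ (m : Nat), m ≤ cs.length →
    (List.range m).foldl
      (fun d k =>
        match PySem.List.pyGet? cs ((k : Nat) : Int) with
        | some ch => if (PySem.List.slice cs none (some ((k : Nat) : Int))).contains ch then d else d + 1
        | none => d) 0
      = PySem.Set.len (PySem.Set.ofList (cs.take m)) := by
  intro m
  induction m with
  | zero => simp [PySem.Set.len]
  | succ m ih =>
    intro hm
    have hm' : m < cs.length := by omega
    rw [List.range_succ, List.foldl_append, ih (by omega)]
    rw [List.take_add_one, List.getElem?_eq_getElem hm']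
    simp only [Option.toList_some]
    rw [PySem.Set.ofList_append_singleton]
    simp only [List.foldl_cons, List.foldl_nil, PySem.List.pyGet?_natCast,
      PySem.List.slice_to_natCast, List.getElem?_eq_getElem hm']
    by_cases hmem : cs[m] ∈ cs.take m
    · have hmem' : cs[m] ∈ PySem.Set.ofList (cs.take m) := (PySem.Set.mem_ofList _ _).mpr hmem
      rw [PySem.Set.add_of_mem hmem']
      simp [hmem]
    · have hmem' : cs[m] ∉ PySem.Set.ofList (cs.take m) := fun h => hmem ((PySem.Set.mem_ofList _ _).mp h)
      rw [PySem.Set.add_of_not_mem hmem']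
      simp [PySem.Set.len, hmem]

-- ===== VERDICT (by name: the statement is the Claim_ definition above) =====
theorem max_char_spec : Claim_equal_max_char := by
  intro str n hdom hpre
  unfold Spec_max_char max_char max_char_alt
  simp only []
  set cs := str.toList with hcs
  have hlen : n.toNat ≤ cs.length := by
    unfold Pre_max_char at hpre
    rw [PySem.Str.len_eq, ← hcs] at hpre
    omega
  set l := cs.take n.toNat with hl
  have hcodes : ∀ ch ∈ l, ch.toNat < 256 := by
    intro ch hch
    have hmem : ch ∈ cs := List.mem_of_mem_take hch
    have := hdom
    unfold Dom_max_char pvDomStr pvDomChar at this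
    simp only [Bool.and_eq_true, List.all_eq_true] at this
    have h2 := this.1 ch hmem
    simp only [Bool.or_eq_true, Bool.and_eq_true, decide_eq_true_eq, beq_iff_eq,
      Nat.le_iff_lt_or_eq] at h2
    omega
  have hrange : PySem.List.pyRange 0 n 1 = (List.range n.toNat).map (fun k => ((k : Nat) : Int)) := by
    rw [PySem.List.pyRange_one]; simp
  rw [hrange, List.foldl_map, List.foldl_map]
  -- B side
  rw [b_fold_eq_set_len cs n.toNat hlen, ← hl]
  -- A side: counting fold over the prefix l, then the alphabet scan
  rw [fold_range_get cs _ n.toNat _ hlen, ← hl]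
  have hrep : (List.replicate 256 (0 : Int)) = (List.range 256).map (fun _ => (0 : Int)) := by
    simp [List.map_const']
  rw [hrep, count_fold l (fun _ => 0) hcodes]
  have h256 : PySem.List.pyRange 0 256 1 = (List.range 256).map (fun k => ((k : Nat) : Int)) := by
    rw [PySem.List.pyRange_one]; simp
  rw [h256, List.foldl_map]
  have hget : ∀ k ∈ List.range 256,
      PySem.List.pyGetD ((List.range 256).map (fun j => (0 : Int) + (l.countP (fun ch => ch.toNat == j) : Int))) ((k : Nat) : Int) 0
        = (l.countP (fun ch => ch.toNat == k) : Int) := by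
    intro k hk
    rw [List.mem_range] at hk
    rw [PySem.List.pyGetD_natCast, List.getD_eq_getElem?_getD]
    simp [hk]
  rw [PySem.List.foldl_congr_mem (List.range 256) _
        (fun d k => if (l.countP (fun ch => ch.toNat == k) : Int) ≠ 0 then d + 1 else d) 0
        (by intro acc k hk; rw [hget k hk])]
  have hcount := PySem.List.foldl_count_if
      (fun k => decide ((l.countP (fun ch => ch.toNat == k) : Int) ≠ 0)) (List.range 256) 0
  simp only [decide_eq_true_eq] at hcount
  rw [hcount, zero_add]
  have hsame : ((List.range 256).countP fun k => decide ((l.countP (fun ch => ch.toNat == k) : Int) ≠ 0))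
      = ((List.range 256).countP fun j => decide (l.countP (fun ch => ch.toNat == j) ≠ 0)) := by
    apply List.countP_congr
    intro j _
    simp
  rw [hsame]
  exact countP_range_eq_set_len l hcodes
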